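-- pv_equiv track=rewrite | github.com/CongressionalInsights/theworkshop | scripts/tw_tools.py | rollup_status
-- ===== SOURCE A (Python) =====
-- def rollup_status(states: list[str]) -> str:
--     """Canonical status rollup used across project/workstream views."""
--     if any(s == "in_progress" for s in states):
--         return "in_progress"
--     if any(s == "blocked" for s in states):
--         return "blocked"
--     if states and all(s in {"done", "cancelled"} for s in states):
--         return "done"
--     return "planned"
-- ===== SOURCE B (Python) =====
-- def rollup_status(states: list[str]) -> str:
--     """Canonical status rollup: one pass maintaining flags."""
--     has_ip = has_bl = non_empty = False
--     all_dc = True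
--     for s in states:
--         non_empty = True
--         if s == "in_progress":
--             has_ip = True
--         elif s == "blocked":
--             has_bl = True
--         if s not in ("done", "cancelled"):
--             all_dc = False
--     if has_ip:
--         return "in_progress"
--     if has_bl:
--         return "blocked"
--     if non_empty and all_dc:
--         return "done"
--     return "planned"
-- ===== Notes on version B (the rewrite author's own statement) =====
-- stated objective: alternative
-- what changed: Replaces the three short-circuit scans (any/any/all) by a single pass over states maintaining four flags, deciding the rollup after the loop.
import Mathlib
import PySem

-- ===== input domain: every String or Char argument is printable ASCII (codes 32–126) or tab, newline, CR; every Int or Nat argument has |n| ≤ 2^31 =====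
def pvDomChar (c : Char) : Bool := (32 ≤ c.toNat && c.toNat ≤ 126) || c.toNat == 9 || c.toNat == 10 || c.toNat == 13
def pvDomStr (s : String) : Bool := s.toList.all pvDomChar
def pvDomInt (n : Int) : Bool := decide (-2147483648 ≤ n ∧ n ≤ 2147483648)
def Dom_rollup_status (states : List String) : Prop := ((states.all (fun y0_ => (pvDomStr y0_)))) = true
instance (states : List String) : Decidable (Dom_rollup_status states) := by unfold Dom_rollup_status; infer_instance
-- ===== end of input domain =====

-- B replaces A's three short-circuit scans with a single pass maintaining flags (alternative decomposition; same O(n) cost).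


-- ===== PORT A =====
-- Port of A: three sequential scans (any / any / nonempty+all), as in the Python.
def rollup_status (states : List String) : String :=
  if states.any (fun s => s == "in_progress") then "in_progress"
  else if states.any (fun s => s == "blocked") then "blocked"
  else if !states.isEmpty && states.all (fun s => s == "done" || s == "cancelled") then "done"
  else "planned"

-- ===== PORT B =====
-- Port of B: one pass maintaining (has_ip, has_bl, non_empty, all_dc), then decide.
def rollup_status_step (acc : Bool × Bool × Bool × Bool) (s : String) : Bool × Bool × Bool × Bool :=
  let (hip, hbl, _, adc) := acc
  ( (if s == "in_progress" then true else hip),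
    (if s != "in_progress" && s == "blocked" then true else hbl),
    true,
    (if !(s == "done" || s == "cancelled") then false else adc) )

def rollup_status_alt (states : List String) : String :=
  let r := states.foldl rollup_status_step (false, false, false, true)
  if r.1 then "in_progress"
  else if r.2.1 then "blocked"
  else if r.2.2.1 && r.2.2.2 then "done"
  else "planned"

-- ===== PRECONDITION & SPEC =====
def Spec_rollup_status (states : List String) (out : String) : Prop := out = rollup_status_alt states
instance (states : List String) (out : String) : Decidable (Spec_rollup_status states out) := by unfold Spec_rollup_status; infer_instance

-- ===== CLAIM (what is proved, stated in full; the proofs are below) =====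
def Claim_equal_rollup_status : Prop := ∀ (states : List String), Dom_rollup_status states → Spec_rollup_status states (rollup_status states)

-- ===== LEMMAS AND PROOFS =====

-- ===== VERDICT (by name: the statement is the Claim_ definition above) =====
theorem rollup_fold (states : List String) (hip hbl ne adc : Bool) :
    states.foldl rollup_status_step (hip, hbl, ne, adc) =
      (hip || states.any (fun s => s == "in_progress"),
       hbl || states.any (fun s => !(s == "in_progress") && s == "blocked"),
       ne || !states.isEmpty,
       adc && states.all (fun s => s == "done" || s == "cancelled")) := by
  induction states generalizing hip hbl ne adc with
  | nil => simp
  | cons x xs ih =>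
    simp only [List.foldl_cons, rollup_status_step, ih, List.any_cons, List.all_cons,
      List.isEmpty_cons]
    cases hx : (x == "in_progress") <;> cases hd : (x == "done" || x == "cancelled") <;>
      cases hb : (x == "blocked") <;> simp [hx, hd, hb, Bool.or_assoc, Bool.and_assoc, bne]

theorem rollup_any_blocked (states : List String)
    (h1 : states.any (fun s => s == "in_progress") = false) :
    states.any (fun s => !(s == "in_progress") && s == "blocked") =
      states.any (fun s => s == "blocked") := by
  induction states with
  | nil => rfl
  | cons x xs ih =>
    simp only [List.any_cons] at h1 ⊢
    rcases Bool.or_eq_false_iff.mp h1 with ⟨hx, hxs⟩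
    simp [hx, ih hxs]

theorem rollup_status_spec : Claim_equal_rollup_status := by
  intro states _
  show rollup_status states = rollup_status_alt states
  simp only [rollup_status, rollup_status_alt, rollup_fold, Bool.false_or, Bool.true_and]
  by_cases h1 : states.any (fun s => s == "in_progress") = true
  · simp [h1]
  · simp only [Bool.not_eq_true] at h1
    simp [h1, rollup_any_blocked states h1]
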